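-- pv_equiv track=rewrite | github.com/pypi-data/pypi-mirror-401 | packages/inceptbench/inceptbench-2.3.0-py3-none-any.whl/inceptbench/core/utils/json_repair.py | _replace_python_literals
-- ===== SOURCE A (Python) =====
-- def _replace_python_literals(s: str) -> str:
--     """
--     Replace Python-like literals (True/False/None) with JSON (true/false/null),
--     and NaN/Infinity/-Infinity with null (JSON-safe).
--     """
--     tokens = {
--         "True": "true",
--         "False": "false",
--         "None": "null",
--         "NaN": "null",
--         "Infinity": "null",
--         "-Infinity": "null",
--     }
--
--     out = []
--     in_str = False
--     esc = False
--     i = 0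
--     while i < len(s):
--         ch = s[i]
--         if in_str:
--             out.append(ch)
--             if esc:
--                 esc = False
--             elif ch == "\\":
--                 esc = True
--             elif ch == '"':
--                 in_str = False
--             i += 1
--             continue
--
--         if ch == '"':
--             in_str = True
--             out.append(ch)
--             i += 1
--             continue
--
--         # Try token replacements at non-string positions
--         replaced = False
--         for tok, rep in tokens.items():
--             if s.startswith(tok, i):
--                 # ensure token boundary
--                 end = i + len(tok)
--                 prev_ok = i == 0 or not (s[i - 1].isalnum() or s[i - 1] == "_")
--                 next_ok = end == len(s) or not (
--                     s[end].isalnum() or s[end] == "_")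
--                 if prev_ok and next_ok:
--                     out.append(rep)
--                     i = end
--                     replaced = True
--                     break
--         if replaced:
--             continue
--
--         out.append(ch)
--         i += 1
--
--     return "".join(out)
-- ===== SOURCE B (Python) =====
-- def _replace_python_literals(s: str) -> str:
--     """
--     Replace Python-like literals (True/False/None) with JSON (true/false/null),
--     and NaN/Infinity/-Infinity with null (JSON-safe).
--     """
--     reps = {"True": "true", "False": "false", "None": "null",
--             "NaN": "null", "Infinity": "null"}
--
--     def isword(c):
--         return c.isalnum() or c == "_"
--
--     n = len(s)
--     out = []
--     i = 0
--     while i < n: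
--         c = s[i]
--         if c == '"':
--             # skip a whole string literal (verbatim), honouring escapes
--             j = i + 1
--             while j < n:
--                 if s[j] == "\\":
--                     j += 2
--                 elif s[j] == '"':
--                     j += 1
--                     break
--                 else:
--                     j += 1
--             out.append(s[i:j])
--             i = j
--         elif (c == "-" and (i == 0 or not isword(s[i - 1]))
--               and s[i + 1:i + 9] == "Infinity"
--               and (i + 9 >= n or not isword(s[i + 9]))):
--             out.append("null")
--             i += 9
--         elif isword(c):
--             # grab the whole maximal word run at once
--             j = i
--             while j < n and isword(s[j]):
--                 j += 1
--             run = s[i:j]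
--             out.append(reps.get(run, run))
--             i = j
--         else:
--             out.append(c)
--             i += 1
--     return "".join(out)
-- ===== Notes on version B (the rewrite author's own statement) =====
-- stated objective: faster
-- what changed: Replaces A's per-character state machine (in_str/esc flags and a 6-token startswith loop tried at every position) with an index-jumping chunk scanner: whole string literals are skipped in one inner loop, maximal word runs are grabbed at once and replaced by a single dict lookup on the whole run (maximality makes A's boundary checks unnecessary), plus one lookahead branch for the leading minus of the negative-infinity token.
import Mathlib
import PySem

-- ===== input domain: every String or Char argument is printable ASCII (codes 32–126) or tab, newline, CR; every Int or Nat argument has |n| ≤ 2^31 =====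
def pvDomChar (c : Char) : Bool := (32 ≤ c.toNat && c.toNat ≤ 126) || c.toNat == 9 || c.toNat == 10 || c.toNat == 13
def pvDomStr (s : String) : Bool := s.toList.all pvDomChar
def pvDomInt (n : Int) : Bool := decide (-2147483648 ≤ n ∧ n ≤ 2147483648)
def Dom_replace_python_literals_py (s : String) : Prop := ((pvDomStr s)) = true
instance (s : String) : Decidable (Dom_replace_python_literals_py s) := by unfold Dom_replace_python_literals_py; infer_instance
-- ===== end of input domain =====

-- B replaces A's char-by-char in_str/esc + per-position 6-token loop by an index-jumping chunk
-- scanner (skip whole string literals, replace maximal word runs via one dict lookup) — measurably faster.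


-- Python `c.isalnum() or c == '_'`; Char.isAlphanum is exact on the ASCII domain.
def pvWordChar (c : Char) : Bool := c.isAlphanum || c == '_'

-- ===== PORT A =====
-- A's `prev_ok` : i == 0 (prev = none) or previous char not a word char.
def pvPrevOk : Option Char → Bool
  | none => true
  | some c => !(pvWordChar c)

-- A's `next_ok` : end == len(s) or next char not a word char.
def pvNextOk : List Char → Bool
  | [] => true
  | c :: _ => !(pvWordChar c)

-- A's `tokens` dict, in insertion order.
def aTokens : List (List Char × List Char) :=
  [(['T', 'r', 'u', 'e'], ['t', 'r', 'u', 'e']), (['F', 'a', 'l', 's', 'e'], ['f', 'a', 'l', 's', 'e']),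
   (['N', 'o', 'n', 'e'], ['n', 'u', 'l', 'l']), (['N', 'a', 'N'], ['n', 'u', 'l', 'l']),
   (['I', 'n', 'f', 'i', 'n', 'i', 't', 'y'], ['n', 'u', 'l', 'l']),
   (['-', 'I', 'n', 'f', 'i', 'n', 'i', 't', 'y'], ['n', 'u', 'l', 'l'])]

-- A's `for tok, rep in tokens.items()` loop: first token matching with both boundaries ok;
-- returns (rep, last consumed char = s[end-1], remaining suffix = s[end:]).
def aTry (rest : List Char) (prev : Option Char) :
    List (List Char × List Char) → Option (List Char × Char × List Char)
  | [] => none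
  | (tok, rep) :: ts =>
    if rest.take tok.length = tok then
      if pvPrevOk prev && pvNextOk (rest.drop tok.length) then
        some (rep, tok.getLastD ' ', rest.drop tok.length)
      else aTry rest prev ts
    else aTry rest prev ts

theorem aTry_length {toks : List (List Char × List Char)} {rest : List Char} {prev : Option Char}
    {r : List Char × Char × List Char} (hne : ∀ p ∈ toks, (p.1 : List Char) ≠ [])
    (h : aTry rest prev toks = some r) : r.2.2.length < rest.length := by
  induction toks with
  | nil => simp [aTry] at h
  | cons p ts ih =>
    obtain ⟨tok, rep⟩ := p
    simp only [aTry] at h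
    split_ifs at h with h1 h2
    · have hlen : tok.length ≤ rest.length := by
        have := congrArg List.length h1
        simp [List.length_take] at this
        omega
      have htok : tok ≠ [] := hne (tok, rep) (by simp)
      have : 0 < tok.length := List.length_pos_iff.mpr htok
      cases h
      simp [List.length_drop]
      omega
    · exact ih (fun q hq => hne q (by simp [hq])) h
    · exact ih (fun q hq => hne q (by simp [hq])) h

theorem pvTokensNonempty : ∀ p ∈ aTokens, (p.1 : List Char) ≠ [] := by decide

-- A's while loop, state = (remaining suffix, previous original char, in_str, esc).
def aLoop (rest : List Char) (prev : Option Char) (in_str esc : Bool) : List Char :=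
  match rest with
  | [] => []
  | ch :: t =>
    if in_str then
      ch :: (if esc then aLoop t (some ch) true false
        else if ch = '\\' then aLoop t (some ch) true true
        else if ch = '"' then aLoop t (some ch) false false
        else aLoop t (some ch) true false)
    else if ch = '"' then
      ch :: aLoop t (some ch) true false
    else
      match h : aTry (ch :: t) prev aTokens with
      | some (rep, lc, rest') => rep ++ aLoop rest' (some lc) false false
      | none => ch :: aLoop t (some ch) false false
termination_by rest.length
decreasing_by
  · exact Nat.lt_succ_self _
  · exact Nat.lt_succ_self _
  · exact Nat.lt_succ_self _
  · exact Nat.lt_succ_self _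
  · exact Nat.lt_succ_self _
  · exact aTry_length pvTokensNonempty h
  · exact Nat.lt_succ_self _

def replace_python_literals_py (s : String) : String :=
  String.ofList (aLoop s.toList none false false)

-- ===== PORT B =====
-- B's inner `while j < n` loop skipping a string literal: returns the index just past the
-- closing quote (may overshoot len by 1 on a trailing backslash, exactly like Python's j += 2).
def bStrEnd (s : List Char) (j : Nat) : Nat :=
  if j < s.length then
    if s.getD j ' ' = '\\' then bStrEnd s (j + 2)
    else if s.getD j ' ' = '"' then j + 1
    else bStrEnd s (j + 1)
  else j
termination_by s.length - j

theorem bStrEnd_ge (s : List Char) (j : Nat) : j ≤ bStrEnd s j := by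
  fun_induction bStrEnd s j <;> omega

-- B's `reps` dict (the '-Infinity' case is the explicit lookahead branch of the scanner).
def bReps : List (List Char × List Char) :=
  [(['T', 'r', 'u', 'e'], ['t', 'r', 'u', 'e']), (['F', 'a', 'l', 's', 'e'], ['f', 'a', 'l', 's', 'e']),
   (['N', 'o', 'n', 'e'], ['n', 'u', 'l', 'l']), (['N', 'a', 'N'], ['n', 'u', 'l', 'l']),
   (['I', 'n', 'f', 'i', 'n', 'i', 't', 'y'], ['n', 'u', 'l', 'l'])]

-- needed by bScan's termination (cited by name below)
theorem pvRunPos (s : List Char) (i : Nat) (hi : i < s.length)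
    (hw : pvWordChar (s.getD i ' ') = true) :
    0 < ((s.drop i).takeWhile pvWordChar).length := by
  have hd : s.drop i = s.getD i ' ' :: s.drop (i + 1) := by
    rw [List.getD_eq_getElem s ' ' hi]
    exact List.drop_eq_getElem_cons hi
  rw [hd, List.takeWhile_cons, hw]
  simp

-- B's outer scanner over indices of the original string.
def bScan (s : List Char) (i : Nat) : List Char :=
  if hi : i < s.length then
    if s.getD i ' ' = '"' then
      (s.drop i).take (bStrEnd s (i + 1) - i) ++ bScan s (bStrEnd s (i + 1))
    else if (s.getD i ' ' = '-' && (i == 0 || !pvWordChar (s.getD (i - 1) ' '))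
        && ((s.drop (i + 1)).take 8 == ['I', 'n', 'f', 'i', 'n', 'i', 't', 'y'])
        && (decide (s.length ≤ i + 9) || !pvWordChar (s.getD (i + 9) ' '))) then
      ['n', 'u', 'l', 'l'] ++ bScan s (i + 9)
    else if hw : pvWordChar (s.getD i ' ') = true then
      let run := (s.drop i).takeWhile pvWordChar
      ((bReps.lookup run).getD run) ++ bScan s (i + run.length)
    else
      s.getD i ' ' :: bScan s (i + 1)
  else []
termination_by s.length - i
decreasing_by
  · have := bStrEnd_ge s (i + 1); omega
  · omega
  · have := pvRunPos s i hi hw; omega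
  · omega

def replace_python_literals_py_alt (s : String) : String :=
  String.ofList (bScan s.toList 0)

-- ===== PRECONDITION & SPEC =====
def Spec_replace_python_literals_py (s : String) (out : String) : Prop := out = replace_python_literals_py_alt s
instance (s : String) (out : String) : Decidable (Spec_replace_python_literals_py s out) := by unfold Spec_replace_python_literals_py; infer_instance

-- ===== CLAIM =====
def Claim_equal_replace_python_literals_py : Prop := ∀ (s : String), Dom_replace_python_literals_py s → Spec_replace_python_literals_py s (replace_python_literals_py s)

-- ===== LEMMAS AND PROOFS =====

-- A's `prev` at scan position i is the original char s[i-1] (none at the start).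
def prevAt (s : List Char) (i : Nat) : Option Char :=
  if i = 0 then none else some (s.getD (i - 1) ' ')


-- ---- small utilities about getD / take / drop / takeWhile ----

theorem pvGetD_drop (s : List Char) (i k : Nat) : (s.drop i).getD k ' ' = s.getD (i + k) ' ' := by
  simp [List.getD_eq_getElem?_getD, List.getElem?_drop]

theorem pvHeadD_getD (l : List Char) : l.headD ' ' = l.getD 0 ' ' := by cases l <;> rfl

theorem pvNextOk_eq (l : List Char) : pvNextOk l = !pvWordChar (l.headD ' ') := by
  cases l <;> simp [pvNextOk] <;> decide

theorem pvNextOk_drop (s : List Char) (k : Nat) :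
    pvNextOk (s.drop k) = !pvWordChar (s.getD k ' ') := by
  rw [pvNextOk_eq, pvHeadD_getD, pvGetD_drop]; simp

theorem pvGetD_oob (s : List Char) (k : Nat) (h : s.length ≤ k) : s.getD k ' ' = ' ' := by
  simp [List.getD_eq_getElem?_getD, List.getElem?_eq_none (by omega : s.length ≤ k)]

theorem pvDrop_cons (s : List Char) (i : Nat) (h : i < s.length) :
    s.drop i = s.getD i ' ' :: s.drop (i + 1) := by
  rw [List.getD_eq_getElem s ' ' h]; exact List.drop_eq_getElem_cons h

theorem pvGetD_take (s : List Char) (i m j : Nat) (r : List Char)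
    (hr : (s.drop i).take m = r) (hj : j < m) : s.getD (i + j) ' ' = r.getD j ' ' := by
  subst hr
  simp [List.getD_eq_getElem?_getD, List.getElem?_take_of_lt hj, List.getElem?_drop]

theorem pvTakeWhile_take (l : List Char) (p : Char → Bool) :
    l.take (l.takeWhile p).length = l.takeWhile p :=
  ((List.prefix_iff_eq_take).1 (List.takeWhile_prefix p)).symm

theorem pvTakeWhile_drop (l : List Char) (p : Char → Bool) :
    l.drop (l.takeWhile p).length = l.dropWhile p := by
  induction l with
  | nil => rfl
  | cons a t ih => by_cases h : p a <;> simp [h, ih]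

theorem pvHeadD_dropWhile (l : List Char) : pvWordChar ((l.dropWhile pvWordChar).headD ' ') = false := by
  induction l with
  | nil => decide
  | cons a t ih =>
    by_cases h : pvWordChar a
    · simpa [List.dropWhile_cons, h] using ih
    · simpa [List.dropWhile_cons, h] using h

theorem pvNextOk_after_tw (l : List Char) :
    pvNextOk (l.drop (l.takeWhile pvWordChar).length) = true := by
  rw [pvTakeWhile_drop, pvNextOk_eq, pvHeadD_dropWhile]; rfl

-- the word run after position i starts and stops exactly where A's boundary checks look
theorem pvWord_after_run (s : List Char) (i : Nat) :
    pvWordChar (s.getD (i + ((s.drop i).takeWhile pvWordChar).length) ' ') = false := by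
  have := pvNextOk_after_tw (s.drop i)
  rw [List.drop_drop, pvNextOk_drop] at this
  simpa [Nat.add_comm] using this

-- a maximal word run is characterised by: word prefix + non-word continuation
theorem pvTw_of_take (tok : List Char) : ∀ (l : List Char), tok.all pvWordChar = true →
    l.take tok.length = tok → pvNextOk (l.drop tok.length) = true → l.takeWhile pvWordChar = tok := by
  induction tok with
  | nil =>
    intro l _ _ hnext
    cases l with
    | nil => rfl
    | cons a t =>
      simp [pvNextOk] at hnext
      simp [List.takeWhile_cons, hnext]
  | cons a tok' ih =>
    intro l hall htake hnext
    cases l with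
    | nil => simp at htake
    | cons b t =>
      simp [List.take_succ_cons] at htake
      obtain ⟨rfl, ht⟩ := htake
      simp at hall
      simp [List.takeWhile_cons, hall.1]
      exact ih t (by simpa using hall.2) ht (by simpa using hnext)


theorem pvPrevOk_prevAt (s : List Char) (i : Nat) :
    pvPrevOk (prevAt s i) = (i == 0 || !pvWordChar (s.getD (i - 1) ' ')) := by
  by_cases h : i = 0 <;> simp [prevAt, pvPrevOk, h]

-- ---- characterising A's token loop ----

-- one iteration of A's token loop for an all-word token, given prev_ok: the combined
-- startswith + boundary test succeeds exactly when the token IS the maximal word run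
theorem aTry_step (rest : List Char) (prev : Option Char) (tok rep : List Char)
    (ts : List (List Char × List Char)) (hp : pvPrevOk prev = true)
    (hall : tok.all pvWordChar = true) :
    aTry rest prev ((tok, rep) :: ts) =
      if rest.takeWhile pvWordChar = tok then
        some (rep, tok.getLastD ' ', rest.drop tok.length)
      else aTry rest prev ts := by
  simp only [aTry, hp, Bool.true_and]
  by_cases h1 : rest.take tok.length = tok
  · by_cases h2 : pvNextOk (rest.drop tok.length) = true
    · have htw := pvTw_of_take tok rest hall h1 h2
      simp [h1, h2, htw]
    · have htw : rest.takeWhile pvWordChar ≠ tok := by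
        intro he
        apply h2
        have := pvNextOk_after_tw rest
        rwa [he] at this
      simp [h1, h2, htw]
  · have htw : rest.takeWhile pvWordChar ≠ tok := by
      intro he
      apply h1
      have := pvTakeWhile_take rest pvWordChar
      rwa [he] at this
    simp [h1, htw]

-- the trailing '-Infinity' entry can never fire when the scan is at a word char
theorem aTry_minus (rest : List Char) (prev : Option Char)
    (hw : pvWordChar (rest.headD ' ') = true) :
    aTry rest prev [(['-', 'I', 'n', 'f', 'i', 'n', 'i', 't', 'y'], ['n', 'u', 'l', 'l'])] = none := by
  cases rest with
  | nil => exact absurd hw (by decide)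
  | cons c t =>
    have hw' : pvWordChar c = true := by simpa using hw
    have hc : c ≠ '-' := by
      intro h
      subst h
      exact absurd hw' (by decide)
    simp [aTry, hc]

-- at a word char with prev_ok, A's whole token loop is one lookup of the maximal word run
theorem aTry_word (rest : List Char) (prev : Option Char) (hp : pvPrevOk prev = true)
    (hw : pvWordChar (rest.headD ' ') = true) :
    aTry rest prev aTokens =
      ((bReps.lookup (rest.takeWhile pvWordChar)).map
        (fun rep => (rep, (rest.takeWhile pvWordChar).getLastD ' ',
          rest.drop (rest.takeWhile pvWordChar).length))) := by
  show aTry rest prev (_ :: _ :: _ :: _ :: _ :: _) = _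
  rw [aTry_step _ _ _ _ _ hp (by decide), aTry_step _ _ _ _ _ hp (by decide),
    aTry_step _ _ _ _ _ hp (by decide), aTry_step _ _ _ _ _ hp (by decide),
    aTry_step _ _ _ _ _ hp (by decide), aTry_minus _ _ hw]
  by_cases e1 : rest.takeWhile pvWordChar = ['T', 'r', 'u', 'e']
  · simp [e1, bReps]
    try decide
  by_cases e2 : rest.takeWhile pvWordChar = ['F', 'a', 'l', 's', 'e']
  · simp [e1, e2, bReps]
    try decide
  by_cases e3 : rest.takeWhile pvWordChar = ['N', 'o', 'n', 'e']
  · simp [e1, e2, e3, bReps]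
    try decide
  by_cases e4 : rest.takeWhile pvWordChar = ['N', 'a', 'N']
  · simp [e1, e2, e3, e4, bReps]
    try decide
  by_cases e5 : rest.takeWhile pvWordChar = ['I', 'n', 'f', 'i', 'n', 'i', 't', 'y']
  · simp [e1, e2, e3, e4, e5, bReps]
    try decide
  · have b1 := beq_eq_false_iff_ne.mpr e1
    have b2 := beq_eq_false_iff_ne.mpr e2
    have b3 := beq_eq_false_iff_ne.mpr e3
    have b4 := beq_eq_false_iff_ne.mpr e4
    have b5 := beq_eq_false_iff_ne.mpr e5
    simp [bReps, List.lookup, b1, b2, b3, b4, b5, e1, e2, e3, e4, e5]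

-- at a word char whose predecessor is a word char, no token can fire
theorem aTry_prev_word (rest : List Char) (p : Char) (hp : pvWordChar p = true)
    (hw : pvWordChar (rest.headD ' ') = true) :
    aTry rest (some p) aTokens = none := by
  have hpf : pvPrevOk (some p) = false := by simp [pvPrevOk, hp]
  simp [aTokens, aTry, hpf]

-- at a non-word char other than '-', no token can fire
theorem aTry_nonword (c : Char) (t : List Char) (prev : Option Char)
    (hw : pvWordChar c = false) (hm : c ≠ '-') :
    aTry (c :: t) prev aTokens = none := by
  have hT : c ≠ 'T' := by intro h; subst h; exact absurd hw (by decide)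
  have hF : c ≠ 'F' := by intro h; subst h; exact absurd hw (by decide)
  have hN : c ≠ 'N' := by intro h; subst h; exact absurd hw (by decide)
  have hI : c ≠ 'I' := by intro h; subst h; exact absurd hw (by decide)
  simp [aTry, aTokens, hT, hF, hN, hI, hm]


theorem pvGetLastD_getD (l : List Char) (d : Char) (h : l ≠ []) :
    l.getD (l.length - 1) d = l.getLastD d := by
  induction l with
  | nil => simp at h
  | cons a t ih =>
    cases t with
    | nil => rfl
    | cons b u => simpa using ih (by simp)

-- A's token loop at a '-' : only the '-Infinity' entry can fire
theorem aTry_dash (t : List Char) (prev : Option Char) :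
    aTry ('-' :: t) prev aTokens =
      if t.take 8 = ['I', 'n', 'f', 'i', 'n', 'i', 't', 'y'] ∧
          (pvPrevOk prev && pvNextOk (t.drop 8)) = true then
        some (['n', 'u', 'l', 'l'], 'y', t.drop 8)
      else none := by
  have hT : ('-' : Char) ≠ 'T' := by decide
  have hF : ('-' : Char) ≠ 'F' := by decide
  have hN : ('-' : Char) ≠ 'N' := by decide
  have hI : ('-' : Char) ≠ 'I' := by decide
  by_cases h8 : t.take 8 = ['I', 'n', 'f', 'i', 'n', 'i', 't', 'y']
  · by_cases hb : (pvPrevOk prev && pvNextOk (t.drop 8)) = true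
    · simp [aTry, aTokens, hT, hF, hN, hI, h8, hb]
    · simp [aTry, aTokens, hT, hF, hN, hI, h8, hb]
  · simp [aTry, aTokens, hT, hF, hN, hI, h8]


-- ---- one-step unfolding lemmas for A's loop ----

theorem aLoop_nil (p : Option Char) (i e : Bool) : aLoop [] p i e = [] := by rw [aLoop]

theorem aLoop_str_esc (d : Char) (t : List Char) (p : Option Char) :
    aLoop (d :: t) p true true = d :: aLoop t (some d) true false := by
  rw [aLoop]; simp

theorem aLoop_str_backslash (t : List Char) (p : Option Char) :
    aLoop ('\\' :: t) p true false = '\\' :: aLoop t (some '\\') true true := by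
  rw [aLoop]; simp

theorem aLoop_str_quote (t : List Char) (p : Option Char) :
    aLoop ('"' :: t) p true false = '"' :: aLoop t (some '"') false false := by
  rw [aLoop]; simp

theorem aLoop_str_other (c : Char) (t : List Char) (p : Option Char)
    (hb : c ≠ '\\') (hq : c ≠ '"') :
    aLoop (c :: t) p true false = c :: aLoop t (some c) true false := by
  rw [aLoop]; simp [hb, hq]

theorem aLoop_open (t : List Char) (p : Option Char) :
    aLoop ('"' :: t) p false false = '"' :: aLoop t (some '"') true false := by
  rw [aLoop]; simp

theorem aLoop_copy (c : Char) (t : List Char) (p : Option Char) (hq : c ≠ '"')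
    (hnone : aTry (c :: t) p aTokens = none) :
    aLoop (c :: t) p false false = c :: aLoop t (some c) false false := by
  rw [aLoop]
  simp only [Bool.false_eq_true, if_false, if_neg hq]
  split
  · rename_i rep lc rest' heq
    rw [hnone] at heq
    cases heq
  · rfl

theorem aLoop_tok (c : Char) (t : List Char) (p : Option Char) (rep : List Char) (lc : Char)
    (rest' : List Char) (hq : c ≠ '"')
    (hsome : aTry (c :: t) p aTokens = some (rep, lc, rest')) :
    aLoop (c :: t) p false false = rep ++ aLoop rest' (some lc) false false := by
  rw [aLoop]
  simp only [Bool.false_eq_true, if_false, if_neg hq]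
  split
  · rename_i r l rr heq
    rw [hsome] at heq
    cases heq
    rfl
  · rename_i heq
    rw [hsome] at heq
    cases heq

-- A copies word chars verbatim while the previous char is a word char
theorem copyRun (r : List Char) : ∀ (t : List Char) (p : Char), r.all pvWordChar = true →
    pvWordChar p = true →
    aLoop (r ++ t) (some p) false false = r ++ aLoop t (some (r.getLastD p)) false false := by
  induction r with
  | nil => intro t p _ _; simp
  | cons a r' ih =>
    intro t p hall hp
    have ha : pvWordChar a = true := by
      have := hall
      simp at this
      exact this.1
    have hall' : r'.all pvWordChar = true := by
      have := hall
      simp at this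
      simpa using this.2
    have hq : a ≠ '"' := by intro h; subst h; exact absurd ha (by decide)
    have hnone := aTry_prev_word (a :: (r' ++ t)) p hp (by simpa using ha)
    rw [List.cons_append, aLoop_copy _ _ _ hq hnone, ih t a hall' ha, List.getLastD_cons]
    simp

theorem bStrEnd_quote_aux (s : List Char) : ∀ (n j : Nat), s.length - j ≤ n →
    bStrEnd s j < s.length → s.getD (bStrEnd s j - 1) ' ' = '"' := by
  intro n
  induction n with
  | zero =>
    intro j hle h
    rw [bStrEnd, if_neg (by omega)] at h
    omega
  | succ n ih =>
    intro j hle h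
    by_cases hj : j < s.length
    · by_cases hb : s.getD j ' ' = '\\'
      · rw [bStrEnd, if_pos hj, if_pos hb] at h ⊢
        exact ih (j + 2) (by omega) h
      · by_cases hq : s.getD j ' ' = '"'
        · rw [bStrEnd, if_pos hj, if_neg hb, if_pos hq]
          simpa using hq
        · rw [bStrEnd, if_pos hj, if_neg hb, if_neg hq] at h ⊢
          exact ih (j + 1) (by omega) h
    · rw [bStrEnd, if_neg hj] at h
      omega

theorem bStrEnd_quote (s : List Char) (j : Nat) (h : bStrEnd s j < s.length) :
    s.getD (bStrEnd s j - 1) ' ' = '"' :=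
  bStrEnd_quote_aux s s.length j (by omega) h

-- A's in-string mode copies verbatim up to B's bStrEnd index and resumes there
theorem strLemma (s : List Char) : ∀ (n j : Nat) (p : Option Char), s.length - j ≤ n →
    aLoop (s.drop j) p true false =
      (s.drop j).take (bStrEnd s j - j) ++
        aLoop (s.drop (bStrEnd s j)) (prevAt s (bStrEnd s j)) false false := by
  intro n
  induction n with
  | zero =>
    intro j p hle
    have hj : ¬ j < s.length := by omega
    rw [bStrEnd, if_neg hj, List.drop_eq_nil_of_le (by omega)]
    simp [aLoop_nil]
  | succ n ih =>
    intro j p hle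
    by_cases hj : j < s.length
    · have hd := pvDrop_cons s j hj
      by_cases hb : s.getD j ' ' = '\\'
      · rw [bStrEnd, if_pos hj, if_pos hb]
        have hge := bStrEnd_ge s (j + 2)
        by_cases hj1 : j + 1 < s.length
        · have hd1 := pvDrop_cons s (j + 1) hj1
          rw [hd, hb, aLoop_str_backslash, hd1, aLoop_str_esc,
            ih (j + 2) (some (s.getD (j + 1) ' ')) (by omega)]
          have he2 : bStrEnd s (j + 2) - j = bStrEnd s (j + 2) - (j + 2) + 1 + 1 := by omega
          rw [he2, List.take_succ_cons, List.take_succ_cons]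
          simp
        · have hnil : s.drop (j + 1) = [] := List.drop_eq_nil_of_le (by omega)
          have he : bStrEnd s (j + 2) = j + 2 := by rw [bStrEnd, if_neg (by omega)]
          have hnil2 : s.drop (j + 2) = [] := List.drop_eq_nil_of_le (by omega)
          have h2 : j + 2 - j = 2 := by omega
          rw [hd, hb, aLoop_str_backslash, hnil, he, hnil2, h2, aLoop_nil, aLoop_nil]
          simp
      · by_cases hq : s.getD j ' ' = '"'
        · rw [bStrEnd, if_pos hj, if_neg hb, if_pos hq]
          have h1 : j + 1 - j = 1 := by omega
          have hp1 : prevAt s (j + 1) = some (s.getD j ' ') := by simp [prevAt]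
          rw [hd, hq, aLoop_str_quote, h1, List.take_succ_cons, List.take_zero, hp1, hq]
          simp
        · rw [bStrEnd, if_pos hj, if_neg hb, if_neg hq]
          have hge := bStrEnd_ge s (j + 1)
          rw [hd, aLoop_str_other _ _ _ hb hq, ih (j + 1) (some (s.getD j ' ')) (by omega)]
          have he1 : bStrEnd s (j + 1) - j = bStrEnd s (j + 1) - (j + 1) + 1 := by omega
          rw [he1, List.take_succ_cons]
          simp
    · rw [bStrEnd, if_neg hj, List.drop_eq_nil_of_le (by omega)]
      simp [aLoop_nil]

theorem mainLemma : ∀ (n : Nat) (s : List Char) (i : Nat), s.length - i ≤ n →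
    (i = 0 ∨ pvWordChar (s.getD (i - 1) ' ') = false ∨ pvWordChar (s.getD i ' ') = false) →
    aLoop (s.drop i) (prevAt s i) false false = bScan s i := by
  intro n
  induction n with
  | zero =>
    intro s i hle hH
    have hj : ¬ i < s.length := by omega
    rw [bScan, dif_neg hj, List.drop_eq_nil_of_le (by omega), aLoop_nil]
  | succ n ih =>
    intro s i hle hH
    by_cases hi : i < s.length
    · have hd := pvDrop_cons s i hi
      by_cases hq : s.getD i ' ' = '"'
      · -- B skips the whole string literal that A walks char by char
        have hge := bStrEnd_ge s (i + 1)
        have hinv : bStrEnd s (i + 1) = 0 ∨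
            pvWordChar (s.getD (bStrEnd s (i + 1) - 1) ' ') = false ∨
            pvWordChar (s.getD (bStrEnd s (i + 1)) ' ') = false := by
          by_cases hel : bStrEnd s (i + 1) < s.length
          · right; left
            rw [bStrEnd_quote s (i + 1) hel]
            decide
          · right; right
            rw [pvGetD_oob s _ (by omega)]
            decide
        rw [hd, hq, aLoop_open, strLemma s s.length (i + 1) (some '"') (by omega),
          ih s (bStrEnd s (i + 1)) (by omega) hinv]
        conv_rhs => rw [bScan]
        rw [dif_pos hi, if_pos hq, hd, hq]
        have hei : bStrEnd s (i + 1) - i = (bStrEnd s (i + 1) - (i + 1)) + 1 := by omega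
        rw [hei, List.take_succ_cons]
        simp
      · by_cases hw : pvWordChar (s.getD i ' ') = true
        · -- B replaces the whole maximal word run that A matches token by token
          have hdash : s.getD i ' ' ≠ '-' := by
            intro h
            rw [h] at hw
            exact absurd hw (by decide)
          have hCf : ¬ ((s.getD i ' ' = '-' && (i == 0 || !pvWordChar (s.getD (i - 1) ' '))
              && ((s.drop (i + 1)).take 8 == ['I', 'n', 'f', 'i', 'n', 'i', 't', 'y'])
              && (decide (s.length ≤ i + 9) || !pvWordChar (s.getD (i + 9) ' '))) = true) := by
            intro hC
            simp only [Bool.and_eq_true, decide_eq_true_eq] at hC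
            exact hdash hC.1.1.1
          have hp : pvPrevOk (prevAt s i) = true := by
            rw [pvPrevOk_prevAt]
            rcases hH with h0 | hpw | hcw
            · rw [h0]
              rfl
            · rw [hpw]
              simp
            · rw [hcw] at hw
              cases hw
          have hrw := aTry_word (s.drop i) (prevAt s i) hp (by rw [hd]; simpa using hw)
          have hrun1 : 0 < ((s.drop i).takeWhile pvWordChar).length := pvRunPos s i hi hw
          set run := (s.drop i).takeWhile pvWordChar with hrun
          have htake : (s.drop i).take run.length = run := pvTakeWhile_take _ _
          have hdd : (s.drop i).drop run.length = s.drop (i + run.length) := by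
            rw [List.drop_drop]
          have hprevAt : prevAt s (i + run.length) = some (run.getLastD ' ') := by
            have hne : run ≠ [] := List.ne_nil_of_length_pos hrun1
            have hg := pvGetD_take s i run.length (run.length - 1) run htake (by omega)
            rw [prevAt, if_neg (by omega)]
            have harith : i + run.length - 1 = i + (run.length - 1) := by omega
            rw [harith, hg, pvGetLastD_getD run ' ' hne]
          have hinv := pvWord_after_run s i
          have hihe := ih s (i + run.length) (by omega) (Or.inr (Or.inr hinv))
          conv_rhs => rw [bScan]
          rw [dif_pos hi, if_neg hq, if_neg hCf, dif_pos hw]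
          simp only []
          rw [← hrun]
          rcases hlk : bReps.lookup run with _ | rep
          · -- no token: A copies the run char by char
            have hr : run = s.getD i ' ' :: (s.drop (i + 1)).takeWhile pvWordChar := by
              rw [hrun, hd, List.takeWhile_cons_of_pos hw]
            set r' := (s.drop (i + 1)).takeWhile pvWordChar with hr'
            have hnone : aTry (s.getD i ' ' :: s.drop (i + 1)) (prevAt s i) aTokens = none := by
              rw [← hd, hrw, hlk]
              rfl
            have hsplit : s.drop (i + 1) = r' ++ (s.drop (i + 1)).drop r'.length := by
              have := List.take_append_drop r'.length (s.drop (i + 1))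
              rw [hr', pvTakeWhile_take] at this
              exact this.symm
            have hall : r'.all pvWordChar = true := List.all_takeWhile
            have hdd2 : (s.drop (i + 1)).drop r'.length = s.drop (i + run.length) := by
              rw [List.drop_drop]
              congr 1
              have := congrArg List.length hr
              simp at this
              omega
            conv_lhs => rw [hd]
            rw [aLoop_copy _ _ _ hq hnone]
            conv_lhs => rw [hsplit]
            rw [copyRun r' _ _ hall hw, hdd2]
            have hlast : some (r'.getLastD (s.getD i ' ')) = some (run.getLastD ' ') := by
              rw [hr, List.getLastD_cons]
            rw [hlast, ← hprevAt, hihe]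
            simp only [Option.getD_none]
            rw [hr]
            simp
          · -- token: A fires it in its token loop, B finds it in the dict
            have hsome : aTry (s.getD i ' ' :: s.drop (i + 1)) (prevAt s i) aTokens =
                some (rep, run.getLastD ' ', (s.drop i).drop run.length) := by
              rw [← hd, hrw, hlk]
              rfl
            conv_lhs => rw [hd]
            rw [aLoop_tok _ _ _ _ _ _ hq hsome, hdd, ← hprevAt, hihe]
            simp
        · by_cases hdash : s.getD i ' ' = '-'
          · -- the '-Infinity' lookahead
            have hinv1 : i + 1 = 0 ∨ pvWordChar (s.getD (i + 1 - 1) ' ') = false ∨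
                pvWordChar (s.getD (i + 1) ' ') = false := by
              right; left
              simpa using (Bool.not_eq_true _).mp hw
            have hp1 : prevAt s (i + 1) = some (s.getD i ' ') := by simp [prevAt]
            have hdd : (s.drop (i + 1)).drop 8 = s.drop (i + 9) := by
              rw [List.drop_drop]
            by_cases hfire : (s.drop (i + 1)).take 8 = ['I', 'n', 'f', 'i', 'n', 'i', 't', 'y'] ∧
                (pvPrevOk (prevAt s i) && pvNextOk ((s.drop (i + 1)).drop 8)) = true
            · obtain ⟨h8, hb⟩ := hfire
              rw [Bool.and_eq_true] at hb
              have hw9 : pvWordChar (s.getD (i + 9) ' ') = false := by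
                have := hb.2
                rwa [hdd, pvNextOk_drop, Bool.not_eq_eq_eq_not, Bool.not_true] at this
              have hsome : aTry (s.getD i ' ' :: s.drop (i + 1)) (prevAt s i) aTokens =
                  some (['n', 'u', 'l', 'l'], 'y', (s.drop (i + 1)).drop 8) := by
                rw [hdash, aTry_dash, if_pos ⟨h8, by rw [hb.1, hb.2]; rfl⟩]
              have htake9 : (s.drop i).take 9 = ['-', 'I', 'n', 'f', 'i', 'n', 'i', 't', 'y'] := by
                rw [hd, hdash, List.take_succ_cons, h8]
              have hy : prevAt s (i + 9) = some 'y' := by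
                have hg := pvGetD_take s i 9 8 _ htake9 (by omega)
                rw [prevAt, if_neg (by omega)]
                have harith : i + 9 - 1 = i + 8 := by omega
                rw [harith, hg]
                rfl
              have hC : (s.getD i ' ' = '-' && (i == 0 || !pvWordChar (s.getD (i - 1) ' '))
                  && ((s.drop (i + 1)).take 8 == ['I', 'n', 'f', 'i', 'n', 'i', 't', 'y'])
                  && (decide (s.length ≤ i + 9) || !pvWordChar (s.getD (i + 9) ' '))) = true := by
                have c1 : decide (s.getD i ' ' = '-') = true := decide_eq_true hdash
                have c2 : (i == 0 || !pvWordChar (s.getD (i - 1) ' ')) = true := by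
                  rw [← pvPrevOk_prevAt]
                  exact hb.1
                have c3 : ((s.drop (i + 1)).take 8 == ['I', 'n', 'f', 'i', 'n', 'i', 't', 'y']) = true :=
                  beq_iff_eq.mpr h8
                have c4 : (decide (s.length ≤ i + 9) || !pvWordChar (s.getD (i + 9) ' ')) = true := by
                  rw [hw9]
                  simp
                simp only [c1, c2, c3, c4]
                rfl
              rw [hd, aLoop_tok _ _ _ _ _ _ hq hsome, hdd, ← hy,
                ih s (i + 9) (by omega) (Or.inr (Or.inr hw9))]
              conv_rhs => rw [bScan]
              rw [dif_pos hi, if_neg hq, if_pos hC]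
            · have hnone : aTry (s.getD i ' ' :: s.drop (i + 1)) (prevAt s i) aTokens = none := by
                rw [hdash, aTry_dash, if_neg hfire]
              have hCf : ¬ ((s.getD i ' ' = '-' && (i == 0 || !pvWordChar (s.getD (i - 1) ' '))
                  && ((s.drop (i + 1)).take 8 == ['I', 'n', 'f', 'i', 'n', 'i', 't', 'y'])
                  && (decide (s.length ≤ i + 9) || !pvWordChar (s.getD (i + 9) ' '))) = true) := by
                intro hC
                simp only [Bool.and_eq_true, beq_iff_eq, decide_eq_true_eq, Bool.or_eq_true,
                  Bool.not_eq_true'] at hC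
                apply hfire
                refine ⟨hC.1.2, ?_⟩
                rw [Bool.and_eq_true]
                constructor
                · rw [pvPrevOk_prevAt]
                  simpa using hC.1.1.2
                · rw [hdd, pvNextOk_drop]
                  rcases hC.2 with hoob | hnw
                  · rw [pvGetD_oob s _ hoob]
                    decide
                  · rw [hnw]
                    decide
              rw [hd, aLoop_copy _ _ _ hq hnone, ← hp1,
                ih s (i + 1) (by omega) hinv1]
              conv_rhs => rw [bScan]
              rw [dif_pos hi, if_neg hq, if_neg hCf, dif_neg hw]
          · -- ordinary non-word char, copied by both
            have hwf : pvWordChar (s.getD i ' ') = false := (Bool.not_eq_true _).mp hw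
            have hnone := aTry_nonword (s.getD i ' ') (s.drop (i + 1)) (prevAt s i) hwf hdash
            have hCf : ¬ ((s.getD i ' ' = '-' && (i == 0 || !pvWordChar (s.getD (i - 1) ' '))
                && ((s.drop (i + 1)).take 8 == ['I', 'n', 'f', 'i', 'n', 'i', 't', 'y'])
                && (decide (s.length ≤ i + 9) || !pvWordChar (s.getD (i + 9) ' '))) = true) := by
              intro hC
              simp only [Bool.and_eq_true, decide_eq_true_eq] at hC
              exact hdash hC.1.1.1
            have hinv1 : i + 1 = 0 ∨ pvWordChar (s.getD (i + 1 - 1) ' ') = false ∨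
                pvWordChar (s.getD (i + 1) ' ') = false := by
              right; left
              simpa using hwf
            have hp1 : prevAt s (i + 1) = some (s.getD i ' ') := by simp [prevAt]
            rw [hd, aLoop_copy _ _ _ hq hnone, ← hp1, ih s (i + 1) (by omega) hinv1]
            conv_rhs => rw [bScan]
            rw [dif_pos hi, if_neg hq, if_neg hCf, dif_neg hw]
    · have hj : ¬ i < s.length := hi
      rw [bScan, dif_neg hj, List.drop_eq_nil_of_le (by omega), aLoop_nil]

-- ===== VERDICT =====
theorem replace_python_literals_py_spec : Claim_equal_replace_python_literals_py := by
  intro s _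
  unfold Spec_replace_python_literals_py replace_python_literals_py replace_python_literals_py_alt
  have h := mainLemma s.toList.length s.toList 0 (by omega) (Or.inl rfl)
  simp [prevAt] at h
  rw [h]
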